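-- pv_equiv track=rewrite | github.com/mjmjmj9840/coding-test-study | DFS&BFS/괄호 변환.py | dfs
-- ===== SOURCE A (Python) =====
-- def dfs(w):
--     if w == '':
--         return ''
--
--     left = 0  # '('의 개수
--     right = 0  # ')'의 개수
--
--     for i in range(len(w)):
--         if w[i] == '(':
--             left += 1
--         else:
--             right += 1
--         if left == right:
--             break
--
--     u = w[:i + 1]
--     v = w[i + 1:]
--
--     if correct(u):
--         return u + dfs(v)
--     else:
--         # u의 첫 번째와 마지막 문자를 제거하고 나머지 문자열의 괄호 방향 뒤집은 문자열
--         temp = ''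
--         for i in range(1, len(u) - 1):
--             if u[i] == '(':
--                 temp += ')'
--             else:
--                 temp += '('
--         return '(' + dfs(v) + ')' + temp
--
-- def correct(str):
--     stack = []
--     for i in range(len(str)):
--         if str[i] == '(':
--             stack.append(str[i])
--         else:
--             if not stack:
--                 return False
--             stack.pop()
--
--     if stack:
--         return False
--     return True
-- ===== SOURCE B (Python) =====
-- def dfs(w):
--     # Iterative rewrite: walk balanced chunks left to right with index pointers
--     # (no slicing recursion, no stack rescans), collecting kept text in `pre`
--     # and the wrap-around suffixes in `post` (emitted in reverse at the end).
--     pre = []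
--     post = []
--     n = len(w)
--     i = 0
--     while i < n:
--         bal = 0
--         j = i
--         while j < n:
--             bal += 1 if w[j] == '(' else -1
--             j += 1
--             if bal == 0:
--                 break
--         if bal == 0 and w[i] == '(':
--             pre.append(w[i:j])
--         else:
--             pre.append('(')
--             post.append(')' + ''.join(')' if c == '(' else '(' for c in w[i + 1:j - 1]))
--         i = j
--     return ''.join(pre) + ''.join(reversed(post))
-- ===== Notes on version B (the rewrite author's own statement) =====
-- stated objective: alternative
-- what changed: B replaces A's recursive split-and-slice (which rescans each prefix with a stack check and recurses on a sliced copy of the suffix) by a single iterative left-to-right walk over balanced chunks with index pointers and two accumulators (kept text, and wrap-around suffixes emitted in reverse at the end).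
import Mathlib
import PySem

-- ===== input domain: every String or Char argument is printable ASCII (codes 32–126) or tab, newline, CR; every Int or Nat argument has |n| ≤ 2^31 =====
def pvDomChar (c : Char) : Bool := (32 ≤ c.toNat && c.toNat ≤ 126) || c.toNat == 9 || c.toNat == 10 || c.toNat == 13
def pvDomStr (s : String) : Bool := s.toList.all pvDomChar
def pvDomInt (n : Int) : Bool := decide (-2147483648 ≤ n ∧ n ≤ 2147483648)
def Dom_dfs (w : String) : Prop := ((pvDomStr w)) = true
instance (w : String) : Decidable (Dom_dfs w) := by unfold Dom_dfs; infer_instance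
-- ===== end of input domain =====

-- B replaces A's recursive split-and-slice (stack rescan of each prefix, recursion on a
-- sliced suffix) by one iterative walk over balanced chunks with two accumulators (objective: alternative).
-- Both ports work on List Char (Python str concatenation = list append), wrapped by String.mk.

-- ===== PORT A =====

-- A's first loop: `for i in range(len(w)): update left/right; if left == right: break`.
-- Returns the index i at which the loop stops (last index if it never breaks).
def splitIdxA : List Char → Int → Int → Nat → Nat
  | [], _, _, i => i - 1
  | c :: rest, l, r, i =>
    let l' := if c = '(' then l + 1 else l
    let r' := if c = '(' then r else r + 1
    if l' = r' then i else splitIdxA rest l' r' (i + 1)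

-- A's helper `correct`: stack-based validity scan.
def correctA : List Char → List Char → Bool
  | [], stack => stack.isEmpty
  | c :: rest, stack =>
    if c = '(' then correctA rest (c :: stack)
    else
      match stack with
      | [] => false
      | _ :: s => correctA rest s

-- A's temp loop: `for i in range(1, len(u)-1): temp += flipped u[i]`
-- (the indices 1 .. len(u)-2 are exactly (u.drop 1).dropLast, traversed left to right).
def tempA (u : List Char) : List Char :=
  ((u.drop 1).dropLast).foldl (fun acc c => acc ++ [if c = '(' then ')' else '(']) []

def dfsA (w : List Char) : List Char :=
  if h : w = [] then []
  else
    let i := splitIdxA w 0 0 0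
    let u := w.take (i + 1)
    let v := w.drop (i + 1)
    if correctA u [] then u ++ dfsA v
    else '(' :: (dfsA v ++ ')' :: tempA u)
termination_by w.length
decreasing_by
  all_goals
    have hlen : w.length ≠ 0 := fun hl => h (List.eq_nil_of_length_eq_zero hl)
    rw [List.length_drop]
    omega

def dfs (w : String) : String := String.mk (dfsA w.toList)

-- ===== PORT B =====

-- B's inner loop: advance j until the balance counter hits 0 or the string ends;
-- returns (chunk w[i:j], rest w[j:], final balance).
def chunkB : List Char → Int → List Char × List Char × Int
  | [], b => ([], [], b)
  | c :: rest, b =>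
    if b + (if c = '(' then 1 else -1) = 0 then ([c], rest, 0)
    else
      let t := chunkB rest (b + (if c = '(' then 1 else -1))
      (c :: t.1, t.2.1, t.2.2)

-- termination fact for B's outer loop: a chunk of a nonempty string is nonempty
lemma chunkB_rest_len : ∀ (cs : List Char) (b : Int), (chunkB cs b).2.1.length ≤ cs.length := by
  intro cs
  induction cs with
  | nil => intro b; simp [chunkB]
  | cons c rest ih =>
    intro b
    by_cases h0 : b + (if c = '(' then 1 else -1) = 0
    · simp [chunkB, h0]
    · simp only [chunkB, if_neg h0, List.length_cons]
      exact Nat.le_succ_of_le (ih _)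

lemma chunkB_cons_rest_lt (c : Char) (rest : List Char) (b : Int) :
    (chunkB (c :: rest) b).2.1.length < (c :: rest).length := by
  by_cases h0 : b + (if c = '(' then 1 else -1) = 0
  · simp [chunkB, h0]
  · have := chunkB_rest_len rest (b + (if c = '(' then 1 else -1))
    simp only [chunkB, if_neg h0, List.length_cons]
    omega

-- B's outer `while i < n` loop: pre = kept text, post = wrap-around segments
-- (appended in order, flattened in reverse at the end, as `reversed(post)` does).
def loopB : List Char → List Char → List (List Char) → List Char
  | [], pre, post => pre ++ post.reverse.flatten
  | c :: rest, pre, post =>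
    let t := chunkB (c :: rest) 0
    if t.2.2 = 0 ∧ c = '(' then loopB t.2.1 (pre ++ t.1) post
    else loopB t.2.1 (pre ++ ['('])
      (post ++ [')' :: ((t.1.drop 1).dropLast.map (fun x => if x = '(' then ')' else '('))])
termination_by w _ _ => w.length
decreasing_by
  all_goals exact chunkB_cons_rest_lt c rest 0

def dfs_alt (w : String) : String := String.mk (loopB w.toList [] [])

-- ===== PRECONDITION & SPEC =====
def Spec_dfs (w : String) (out : String) : Prop := out = dfs_alt w
instance (w : String) (out : String) : Decidable (Spec_dfs w out) := by unfold Spec_dfs; infer_instance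

-- ===== CLAIM (what is proved, stated in full; the proofs are below) =====
def Claim_equal_dfs : Prop := ∀ (w : String), Dom_dfs w → Spec_dfs w (dfs w)

-- ===== LEMMAS AND PROOFS =====

-- balance of a prefix: +1 for '(', -1 otherwise
def balC (c : Char) : Int := if c = '(' then 1 else -1
def bal (cs : List Char) : Int := (cs.map balC).sum

lemma bal_nil : bal [] = 0 := rfl
lemma bal_cons (c : Char) (cs : List Char) : bal (c :: cs) = balC c + bal cs := by
  simp [bal]

-- A's split loop when the counts never coincide: stops at the last index.
lemma split_no_zero : ∀ (cs : List Char) (l r : Int) (j : Nat),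
    (∀ k, k < cs.length → (l - r) + bal (cs.take (k + 1)) ≠ 0) →
    splitIdxA cs l r j = j + cs.length - 1 := by
  intro cs
  induction cs with
  | nil => intro l r j _; simp [splitIdxA]
  | cons c rest ih =>
    intro l r j hno
    have harith : (if c = '(' then l + 1 else l) - (if c = '(' then r else r + 1)
        = (l - r) + (if c = '(' then 1 else -1) := by split_ifs <;> ring
    have h0 : (l - r) + (if c = '(' then 1 else -1) ≠ 0 := by
      have := hno 0 (by simp)
      simpa [bal_cons, balC, bal_nil] using this
    have hcond : ¬ ((if c = '(' then l + 1 else l) = (if c = '(' then r else r + 1)) := by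
      split_ifs at h0 ⊢ <;> omega
    simp only [splitIdxA, if_neg hcond]
    rw [ih (if c = '(' then l + 1 else l) (if c = '(' then r else r + 1) (j + 1)
      (by
        intro k hk
        have := hno (k + 1) (by simp; omega)
        rw [List.take_succ_cons, bal_cons] at this
        rw [harith]
        intro he; apply this
        simp [balC] at he ⊢; omega)]
    simp only [List.length_cons]
    omega

-- A's split loop when the counts first coincide after k+1 characters: stops at j + k.
lemma split_first_zero : ∀ (cs : List Char) (k : Nat) (l r : Int) (j : Nat),
    k < cs.length → (l - r) + bal (cs.take (k + 1)) = 0 →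
    (∀ m, m < k → (l - r) + bal (cs.take (m + 1)) ≠ 0) →
    splitIdxA cs l r j = j + k := by
  intro cs
  induction cs with
  | nil => intro k l r j hk; simp at hk
  | cons c rest ih =>
    intro k l r j hk hz hmin
    have harith : (if c = '(' then l + 1 else l) - (if c = '(' then r else r + 1)
        = (l - r) + (if c = '(' then 1 else -1) := by split_ifs <;> ring
    match k with
    | 0 =>
      have h0 : (l - r) + (if c = '(' then 1 else -1) = 0 := by
        simpa [List.take_succ_cons, bal_cons, balC, bal_nil] using hz
      have hcond : (if c = '(' then l + 1 else l) = (if c = '(' then r else r + 1) := by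
        split_ifs at h0 ⊢ <;> omega
      simp [splitIdxA, hcond]
    | k' + 1 =>
      have h0 : (l - r) + (if c = '(' then 1 else -1) ≠ 0 := by
        have := hmin 0 (by omega)
        simpa [List.take_succ_cons, bal_cons, balC, bal_nil] using this
      have hcond : ¬ ((if c = '(' then l + 1 else l) = (if c = '(' then r else r + 1)) := by
        split_ifs at h0 ⊢ <;> omega
      simp only [splitIdxA, if_neg hcond]
      rw [ih k' _ _ (j + 1) (by simp at hk; omega)]
      · omega
      · rw [List.take_succ_cons, bal_cons] at hz
        rw [harith]
        simp [balC] at hz ⊢; omega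
      · intro m hm
        have := hmin (m + 1) (by omega)
        rw [List.take_succ_cons, bal_cons] at this
        rw [harith]
        intro he; apply this; simp [balC] at he ⊢; omega

-- B's chunk scan when the balance never reaches 0: the whole string is the chunk.
lemma chunk_no_zero : ∀ (cs : List Char) (b : Int),
    (∀ k, k < cs.length → b + bal (cs.take (k + 1)) ≠ 0) →
    chunkB cs b = (cs, [], b + bal cs) := by
  intro cs
  induction cs with
  | nil => intro b _; simp [chunkB, bal_nil]
  | cons c rest ih =>
    intro b hno
    have h0 : b + (if c = '(' then 1 else -1) ≠ 0 := by
      have := hno 0 (by simp)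
      simpa [bal_cons, balC, bal_nil] using this
    simp only [chunkB, if_neg h0]
    rw [ih _ (by
      intro k hk
      have := hno (k + 1) (by simp; omega)
      rw [List.take_succ_cons, bal_cons] at this
      intro he; apply this
      simp [balC] at he ⊢; omega)]
    rw [bal_cons]
    refine Prod.ext rfl (Prod.ext rfl ?_)
    simp only [balC]
    ring

-- B's chunk scan when the balance first reaches 0 after k+1 characters.
lemma chunk_first_zero : ∀ (cs : List Char) (k : Nat) (b : Int),
    k < cs.length → b + bal (cs.take (k + 1)) = 0 →
    (∀ m, m < k → b + bal (cs.take (m + 1)) ≠ 0) →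
    chunkB cs b = (cs.take (k + 1), cs.drop (k + 1), 0) := by
  intro cs
  induction cs with
  | nil => intro k b hk; simp at hk
  | cons c rest ih =>
    intro k b hk hz hmin
    match k with
    | 0 =>
      have h0 : b + (if c = '(' then 1 else -1) = 0 := by
        simpa [List.take_succ_cons, bal_cons, balC, bal_nil] using hz
      simp [chunkB, h0]
    | k' + 1 =>
      have h0 : b + (if c = '(' then 1 else -1) ≠ 0 := by
        have := hmin 0 (by omega)
        simpa [List.take_succ_cons, bal_cons, balC, bal_nil] using this
      simp only [chunkB, if_neg h0]
      rw [ih k' _ (by simp at hk; omega)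
        (by rw [List.take_succ_cons, bal_cons] at hz; simp [balC] at hz ⊢; omega)
        (by
          intro m hm
          have := hmin (m + 1) (by omega)
          rw [List.take_succ_cons, bal_cons] at this
          intro he; apply this; simp [balC] at he ⊢; omega)]
      simp

-- correct = true forces total balance = -|stack|.
lemma correct_bal : ∀ (cs s : List Char), correctA cs s = true → (s.length : Int) + bal cs = 0 := by
  intro cs
  induction cs with
  | nil => intro s h; simp [correctA, List.isEmpty_iff] at h; simp [h, bal_nil]
  | cons c rest ih =>
    intro s h
    by_cases hc : c = '('
    · simp only [correctA, if_pos hc] at h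
      have := ih (c :: s) h
      rw [bal_cons]; simp [balC, hc] at this ⊢; omega
    · simp only [correctA, if_neg hc] at h
      match s with
      | [] => simp at h
      | a :: s' =>
        have := ih s' h
        rw [bal_cons]; simp [balC, hc] at this ⊢; omega

-- Conversely: if all intermediate stack sizes stay positive and the final size is 0, correct = true.
lemma correct_of_pos : ∀ (cs s : List Char),
    (s.length : Int) + bal cs = 0 →
    (∀ k, k < cs.length → 0 < (s.length : Int) + bal (cs.take k)) →
    correctA cs s = true := by
  intro cs
  induction cs with
  | nil => intro s h _; simp [bal_nil] at h; simp [correctA, List.isEmpty_iff]; omega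
  | cons c rest ih =>
    intro s hfin hpos
    by_cases hc : c = '('
    · simp only [correctA, if_pos hc]
      apply ih
      · rw [bal_cons] at hfin; simp [balC, hc] at hfin ⊢; omega
      · intro k hk
        have := hpos (k + 1) (by simp; omega)
        rw [List.take_succ_cons, bal_cons] at this
        simp [balC, hc] at this ⊢; omega
    · have hs : 0 < (s.length : Int) := by simpa [bal_nil] using hpos 0 (by simp)
      match s with
      | [] => simp at hs
      | a :: s' =>
        simp only [correctA, if_neg hc]
        apply ih
        · rw [bal_cons] at hfin; simp [balC, hc] at hfin ⊢; omega
        · intro k hk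
          have := hpos (k + 1) (by simp; omega)
          rw [List.take_succ_cons, bal_cons] at this
          simp [balC, hc] at this ⊢; omega

-- a prefix balance drops by at most 1 per step
lemma bal_take_succ_ge (w : List Char) (k : Nat) :
    bal (w.take k) - 1 ≤ bal (w.take (k + 1)) := by
  rw [List.take_succ]
  rcases h : w[k]? with _ | c
  · simp [bal]
  · simp [bal, balC]; split_ifs <;> omega

-- discrete IVT: starting at 1 after one '(' and never hitting 0 keeps the balance positive
lemma bal_pos (w : List Char) (i : Nat) (hh : w.head?.getD ' ' = '(') (hw : w ≠ [])
    (hno : ∀ m, m < i → bal (w.take (m + 1)) ≠ 0) :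
    ∀ k, 1 ≤ k → k ≤ i → 0 < bal (w.take k) := by
  intro k
  induction k with
  | zero => omega
  | succ k ihk =>
    intro _ hki
    match k, ihk with
    | 0, _ =>
      match w, hw with
      | c :: rest, _ =>
        simp at hh
        simp [List.take_succ_cons, bal_cons, bal_nil, balC, hh]
    | k' + 1, ihk =>
      have hpos := ihk (by omega) (by omega)
      have hstep := bal_take_succ_ge w (k' + 1)
      have hne := hno (k' + 1) (by omega)
      omega

-- fold-append is map
lemma foldl_append_map (f : Char → Char) : ∀ (cs acc : List Char),
    cs.foldl (fun acc c => acc ++ [f c]) acc = acc ++ cs.map f := by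
  intro cs
  induction cs with
  | nil => simp
  | cons c rest ih => intro acc; simp [ih]

lemma tempA_eq_map (u : List Char) :
    tempA u = ((u.drop 1).dropLast).map (fun c => if c = '(' then ')' else '(') := by
  unfold tempA; rw [foldl_append_map]; simp

lemma dfsA_nil : dfsA [] = [] := by rw [dfsA]; simp

-- MAIN INVARIANT: B's outer loop produces pre ++ dfsA w ++ flatten(reverse post).
lemma loopB_eq_dfsA : ∀ (n : Nat) (w pre : List Char) (post : List (List Char)),
    w.length ≤ n → loopB w pre post = pre ++ dfsA w ++ post.reverse.flatten := by
  intro n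
  induction n with
  | zero =>
    intro w pre post hw
    have : w = [] := List.eq_nil_of_length_eq_zero (by omega)
    subst this; rw [loopB, dfsA_nil]; simp
  | succ n ih =>
    intro w pre post hw
    rcases w with _ | ⟨c, rest⟩
    · rw [loopB, dfsA_nil]; simp
    set w : List Char := c :: rest with hwdef
    have hnil : w ≠ [] := by simp [hwdef]
    set N := w.length with hN
    have hNpos : 0 < N := by simp [hN, hwdef]
    by_cases hz : ∃ k, k < N ∧ bal (w.take (k + 1)) = 0
    · -- the balance reaches 0; k0 = first such index
      have hex : ∃ k, bal (w.take (k + 1)) = 0 ∧ k < N :=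
        ⟨hz.choose, hz.choose_spec.2, hz.choose_spec.1⟩
      set k0 := Nat.find hex with hk0
      have hk0spec := Nat.find_spec hex
      rw [← hk0] at hk0spec
      obtain ⟨hk0z, hk0lt⟩ := hk0spec
      have hmin : ∀ m, m < k0 → bal (w.take (m + 1)) ≠ 0 := by
        intro m hm hbad
        exact Nat.find_min hex hm ⟨hbad, by omega⟩
      have hchunk : chunkB w 0 = (w.take (k0 + 1), w.drop (k0 + 1), 0) :=
        chunk_first_zero w k0 0 hk0lt (by simpa using hk0z) (by intro m hm; simpa using hmin m hm)
      have hsplit : splitIdxA w 0 0 0 = k0 := by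
        have := split_first_zero w k0 0 0 0 hk0lt (by simpa using hk0z)
          (by intro m hm; simpa using hmin m hm)
        simpa using this
      have hIH := fun pre' post' =>
        ih (w.drop (k0 + 1)) pre' post' (by simp only [List.length_drop]; omega)
      rw [loopB, dfsA]
      rw [dif_neg hnil]
      simp only [← hwdef, hchunk, hsplit]
      by_cases hh : c = '('
      · -- u starts with '(' and is balanced: correct, both keep the chunk
        have hcorrect : correctA (w.take (k0 + 1)) [] = true := by
          rw [hwdef, List.take_succ_cons]
          simp only [correctA, if_pos hh]
          apply correct_of_pos
          · have : bal (w.take (k0 + 1)) = 0 := hk0z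
            rw [hwdef, List.take_succ_cons, bal_cons] at this
            simp [balC, hh] at this ⊢
            omega
          · intro k hk
            have hkmax : k + 1 ≤ k0 := by
              have : (rest.take k0).length ≤ k0 := by simp
              omega
            have hpos := bal_pos w k0 (by simp [hwdef, hh]) hnil hmin (k + 1) (by omega)
              (by omega)
            rw [hwdef, List.take_succ_cons, bal_cons] at hpos
            have htt : (rest.take k0).take k = rest.take k := by
              rw [List.take_take]; congr 1; omega
            simp [balC, hh, htt] at hpos ⊢
            omega
        rw [if_pos (show True ∧ c = '(' from ⟨trivial, hh⟩), if_pos hcorrect, hIH]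
        simp
      · -- u is balanced but starts wrong: correct is false, both wrap
        have hcorrect : correctA (w.take (k0 + 1)) [] = false := by
          rw [hwdef, List.take_succ_cons]
          simp [correctA, hh]
        rw [if_neg (show ¬ (True ∧ c = '(') from fun h => hh h.2), if_neg (by simp [hcorrect]), hIH, tempA_eq_map]
        simp
    · -- the balance never reaches 0: the whole string is one wrong chunk, v = []
      have hno : ∀ k, k < N → bal (w.take (k + 1)) ≠ 0 := by
        intro k hk hbad
        exact hz ⟨k, hk, hbad⟩
      have hchunk : chunkB w 0 = (w, [], bal w) := by
        have := chunk_no_zero w 0 (by intro k hk; simpa using hno k (by omega))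
        simpa using this
      have hbal : bal w ≠ 0 := by
        have := hno (N - 1) (by omega)
        rwa [show N - 1 + 1 = N by omega, hN, List.take_length] at this
      have hsplit : splitIdxA w 0 0 0 = N - 1 := by
        have := split_no_zero w 0 0 0 (by intro k hk; simpa using hno k (by omega))
        simpa [← hN] using this
      have hi1 : N - 1 + 1 = N := by omega
      have htw : w.take N = w := by rw [hN]; exact List.take_length
      have hdropN : w.drop N = ([] : List Char) := by simp [hN]
      have hcorrect : correctA w [] = false := by
        rcases h : correctA w [] with _ | _
        · rfl
        · exact absurd (by simpa using correct_bal w [] h) hbal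
      rw [loopB, dfsA]
      rw [dif_neg hnil]
      simp only [← hwdef, hchunk, hsplit, hi1, htw, hdropN]
      rw [if_neg (show ¬ (bal w = 0 ∧ c = '(') from fun h => hbal h.1), if_neg (by simp [hcorrect]),
        ih [] _ _ (by simp), dfsA_nil, tempA_eq_map]
      simp

-- ===== VERDICT (by name: the statement is the Claim_ definition above) =====
theorem dfs_spec : Claim_equal_dfs := by
  intro w _
  unfold Spec_dfs dfs dfs_alt
  rw [loopB_eq_dfsA w.toList.length w.toList [] [] le_rfl]
  simp
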